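-- pv_equiv track=rewrite | github.com/avnishkanungo/StanfordNERAnnonymizer | stanford_ner_tagger_trial.py | get_continuous_chunks
-- ===== SOURCE A (Python) =====
-- def get_continuous_chunks(tagged_sent):
--     continuous_chunk = []
--     current_chunk = []
--
--     for token, tag in tagged_sent:
--         if tag != "O":
--             current_chunk.append((token, tag))
--         else:
--             if current_chunk: # if the current chunk is not empty
--                 continuous_chunk.append(current_chunk)
--                 current_chunk = []
--     # Flush the final current_chunk into the continuous_chunk, if any.
--     if current_chunk:
--         continuous_chunk.append(current_chunk)
--     return continuous_chunk
-- ===== SOURCE B (Python) =====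
-- def get_continuous_chunks(tagged_sent):
--     # Run-splitting: scan maximal runs of equal (tag != "O") key; keep the non-O runs.
--     result = []
--     i = 0
--     n = len(tagged_sent)
--     while i < n:
--         token, tag = tagged_sent[i]
--         k = tag != "O"
--         j = i + 1
--         while j < n and (tagged_sent[j][1] != "O") == k:
--             j += 1
--         if k:
--             result.append([(t, g) for t, g in tagged_sent[i:j]])
--         i = j
--     return result
-- ===== Notes on version B (the rewrite author's own statement) =====
-- stated objective: alternative
-- what changed: Replaces the element-by-element accumulator (current_chunk buffer with final flush) by a run-splitting scan that finds each maximal run of same (tag != "O") key with an inner pointer and appends the non-O runs directly, no buffer or flush.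
import Mathlib
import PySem

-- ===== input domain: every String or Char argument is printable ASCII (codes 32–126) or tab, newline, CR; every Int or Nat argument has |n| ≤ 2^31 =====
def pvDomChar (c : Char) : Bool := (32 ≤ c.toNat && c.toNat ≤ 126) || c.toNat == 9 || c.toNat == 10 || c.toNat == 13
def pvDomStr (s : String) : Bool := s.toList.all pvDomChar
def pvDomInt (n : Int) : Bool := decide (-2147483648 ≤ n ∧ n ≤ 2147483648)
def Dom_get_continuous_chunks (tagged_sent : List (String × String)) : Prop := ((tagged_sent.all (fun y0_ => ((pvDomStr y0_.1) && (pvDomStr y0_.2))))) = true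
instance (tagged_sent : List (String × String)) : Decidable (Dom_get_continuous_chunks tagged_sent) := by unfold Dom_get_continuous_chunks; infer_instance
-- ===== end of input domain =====

-- B replaces A's element-by-element buffer-and-flush loop by a maximal-run-splitting scan; alternative decomposition, same cost.

-- ===== PORT A =====
-- loop body of A: state is (continuous_chunk, current_chunk)
def pvStepA (s : List (List (String × String)) × List (String × String))
    (p : String × String) : List (List (String × String)) × List (String × String) :=
  if p.2 ≠ "O" then
    (s.1, s.2 ++ [p])
  else
    if s.2 ≠ [] then (s.1 ++ [s.2], []) else (s.1, s.2)

def get_continuous_chunks (tagged_sent : List (String × String)) : List (List (String × String)) :=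
  let s := tagged_sent.foldl pvStepA ([], [])
  if s.2 ≠ [] then s.1 ++ [s.2] else s.1

-- ===== PORT B =====
-- Source B's outer while loop: each step consumes one maximal run of equal (tag != "O") key
def get_continuous_chunks_alt (tagged_sent : List (String × String)) : List (List (String × String)) :=
  match tagged_sent with
  | [] => []
  | p :: xs =>
    let k : Bool := p.2 != "O"
    let grp := p :: xs.takeWhile (fun q => (q.2 != "O") == k)
    let rest := xs.dropWhile (fun q => (q.2 != "O") == k)
    if k then grp :: get_continuous_chunks_alt rest else get_continuous_chunks_alt rest
termination_by tagged_sent.length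
decreasing_by
  all_goals
    simp only [List.length_cons]
    exact Nat.lt_succ_of_le (List.length_dropWhile_le _ _)

-- ===== PRECONDITION & SPEC =====
def Spec_get_continuous_chunks (tagged_sent : List (String × String)) (out : List (List (String × String))) : Prop := out = get_continuous_chunks_alt tagged_sent
instance (tagged_sent : List (String × String)) (out : List (List (String × String))) : Decidable (Spec_get_continuous_chunks tagged_sent out) := by unfold Spec_get_continuous_chunks; infer_instance

-- ===== CLAIM (what is proved, stated in full; the proofs are below) =====
def Claim_equal_get_continuous_chunks : Prop := ∀ (tagged_sent : List (String × String)), Dom_get_continuous_chunks tagged_sent → Spec_get_continuous_chunks tagged_sent (get_continuous_chunks tagged_sent)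

-- ===== LEMMAS AND PROOFS =====

-- reference recursion: process the list with pending current chunk `cur`
def pvSpecRec (cur : List (String × String)) : List (String × String) → List (List (String × String))
  | [] => if cur = [] then [] else [cur]
  | p :: xs =>
    if p.2 ≠ "O" then pvSpecRec (cur ++ [p]) xs
    else (if cur = [] then [] else [cur]) ++ pvSpecRec [] xs

theorem pvA_eq_spec (l : List (String × String)) :
    ∀ (cc : List (List (String × String))) (cur : List (String × String)),
      (let s := l.foldl pvStepA (cc, cur); if s.2 ≠ [] then s.1 ++ [s.2] else s.1)
        = cc ++ pvSpecRec cur l := by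
  induction l with
  | nil =>
    intro cc cur
    simp only [List.foldl_nil, pvSpecRec]
    by_cases h : cur = [] <;> simp [h]
  | cons p xs ih =>
    intro cc cur
    simp only [List.foldl_cons, pvSpecRec, pvStepA]
    by_cases hp : p.2 ≠ "O"
    · simp only [if_pos hp, ih]
    · simp only [if_neg hp]
      by_cases hc : cur = []
      · simp [hc, ih]
      · simp [hc, ih]

theorem pvSpec_nonempty (xs : List (String × String)) :
    ∀ cur : List (String × String), cur ≠ [] →
      pvSpecRec cur xs
        = (cur ++ xs.takeWhile (fun q => q.2 != "O")) :: pvSpecRec [] (xs.dropWhile (fun q => q.2 != "O")) := by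
  induction xs with
  | nil => intro cur h; simp [pvSpecRec, h]
  | cons p xs ih =>
    intro cur h
    by_cases hp : p.2 ≠ "O"
    · have hb : (p.2 != "O") = true := by simp [hp]
      simp only [pvSpecRec, if_pos hp, List.takeWhile_cons, List.dropWhile_cons, hb]
      rw [ih (cur ++ [p]) (by simp)]
      simp
    · have hb : (p.2 != "O") = false := by simpa using hp
      simp [pvSpecRec, hp, hb, h]

theorem pvPredFalse :
    (fun q : String × String => (q.2 != "O") == false) = (fun q : String × String => q.2 == "O") := by
  funext q; cases h : q.2 == "O" <;> simp_all

theorem pvPredTrue :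
    (fun q : String × String => (q.2 != "O") == true) = (fun q : String × String => q.2 != "O") := by
  funext q; simp

theorem pvSpec_skipO (xs : List (String × String)) :
    pvSpecRec [] (xs.dropWhile (fun q => q.2 == "O")) = pvSpecRec [] xs := by
  induction xs with
  | nil => rfl
  | cons p xs ih =>
    by_cases hp : p.2 = "O"
    · have hb : ((p.2 : String) == "O") = true := by simp [hp]
      rw [List.dropWhile_cons]
      simp only [hb]
      rw [if_pos trivial, ih]
      simp [pvSpecRec, hp]
    · have hb : ((p.2 : String) == "O") = false := by simp [hp]
      rw [List.dropWhile_cons]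
      simp [hb]

theorem pvAlt_len_eq_spec (n : Nat) :
    ∀ l : List (String × String), l.length ≤ n → get_continuous_chunks_alt l = pvSpecRec [] l := by
  induction n with
  | zero =>
    intro l hl
    have : l = [] := List.eq_nil_of_length_eq_zero (Nat.le_zero.mp hl)
    subst this
    simp [get_continuous_chunks_alt, pvSpecRec]
  | succ n ih =>
    intro l hl
    cases l with
    | nil => simp [get_continuous_chunks_alt, pvSpecRec]
    | cons p xs =>
      rw [get_continuous_chunks_alt]
      by_cases hp : p.2 = "O"
      · have hk : (p.2 != "O") = false := by simp [hp]
        simp only [hk, if_neg Bool.false_ne_true, pvPredFalse]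
        rw [ih _ (le_trans (List.length_dropWhile_le _ _) (Nat.le_of_succ_le_succ hl))]
        rw [pvSpec_skipO]
        simp [pvSpecRec, hp]
      · have hk : (p.2 != "O") = true := by simp [hp]
        simp only [hk, pvPredTrue]
        rw [ih _ (le_trans (List.length_dropWhile_le _ _) (Nat.le_of_succ_le_succ hl))]
        have h1 : pvSpecRec ([] : List (String × String)) (p :: xs) = pvSpecRec [p] xs := by
          simp [pvSpecRec, hp]
        rw [h1, pvSpec_nonempty xs [p] (by simp)]
        simp

theorem pvAlt_eq_spec (l : List (String × String)) :
    get_continuous_chunks_alt l = pvSpecRec [] l :=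
  pvAlt_len_eq_spec l.length l (le_refl _)

-- ===== VERDICT (by name: the statement is the Claim_ definition above) =====
theorem get_continuous_chunks_spec : Claim_equal_get_continuous_chunks := by
  intro l _
  unfold Spec_get_continuous_chunks
  rw [pvAlt_eq_spec]
  have := pvA_eq_spec l [] []
  simpa [get_continuous_chunks] using this
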